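-- pv_equiv track=rewrite | github.com/Mminmint/LaneAdbisory | main.py | lineBound
-- ===== SOURCE A (Python) =====
-- def lineBound(readyLCDict):
--     LCBound = [0]
--     readyLC = []
--
--     for i in range(3):
--         if i in readyLCDict.keys():
--             bound = LCBound[-1] + len(readyLCDict[i])
--             LCBound.append(bound)
--             readyLC.extend(readyLCDict[i])
--         else:
--             LCBound.append(LCBound[-1])
--
--     LCBound.pop(0)
--     return LCBound, readyLC
-- ===== SOURCE B (Python) =====
-- def lineBound(readyLCDict):
--     chunks = [readyLCDict.get(i, []) for i in range(3)]
--     lengths = [len(c) for c in chunks]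
--     LCBound = [sum(lengths[:i + 1]) for i in range(3)]
--     readyLC = [x for c in chunks for x in c]
--     return LCBound, readyLC
-- ===== Notes on version B (the rewrite author's own statement) =====
-- stated objective: simpler
-- what changed: Replaces the single interleaved loop with running-total mutation by three declarative comprehensions: a chunks/lengths table, prefix sums computed as sums of slices, and a flat concatenation.
import Mathlib
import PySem

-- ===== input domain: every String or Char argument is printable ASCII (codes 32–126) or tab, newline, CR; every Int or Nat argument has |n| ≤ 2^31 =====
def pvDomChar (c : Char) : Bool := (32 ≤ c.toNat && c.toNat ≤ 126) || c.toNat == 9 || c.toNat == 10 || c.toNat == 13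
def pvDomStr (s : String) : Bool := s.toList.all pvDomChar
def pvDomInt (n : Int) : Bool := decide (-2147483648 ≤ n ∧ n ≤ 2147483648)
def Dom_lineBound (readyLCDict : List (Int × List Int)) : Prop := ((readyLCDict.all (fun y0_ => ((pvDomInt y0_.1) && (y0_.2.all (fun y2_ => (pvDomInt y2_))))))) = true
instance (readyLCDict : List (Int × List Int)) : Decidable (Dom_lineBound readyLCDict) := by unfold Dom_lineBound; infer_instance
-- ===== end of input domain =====

-- B is simpler: the interleaved loop with a running total is replaced by declarative
-- comprehensions (chunks/lengths table, prefix sums as slice-sums, flat concatenation).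

-- dict lookup on the association list (first match), shared by both ports
def pvFind (d : List (Int × List Int)) (i : Int) : Option (List Int) :=
  (d.find? (fun p => p.1 == i)).map Prod.snd

-- ===== PORT A =====
-- 'i in readyLCDict.keys()' + 'readyLCDict[i]' = match on pvFind (some ↔ key present).
-- LCBound[-1]: LCBound starts as [0] and only grows, so pyGet? (-1) never fails; .getD 0 unreachable.
-- LCBound.pop(0) on the nonempty list = tail.
def lineBound (readyLCDict : List (Int × List Int)) : List Int × List Int :=
  let st := (PySem.List.pyRange 0 3 1).foldl
    (fun (st : List Int × List Int) i =>
      match pvFind readyLCDict i with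
      | some v =>
          let bound := (PySem.List.pyGet? st.1 (-1)).getD 0 + (v.length : Int)
          (st.1 ++ [bound], st.2 ++ v)
      | none => (st.1 ++ [(PySem.List.pyGet? st.1 (-1)).getD 0], st.2))
    ([0], [])
  (st.1.tail, st.2)

-- ===== PORT B =====
def lineBound_alt (readyLCDict : List (Int × List Int)) : List Int × List Int :=
  let chunks := (PySem.List.pyRange 0 3 1).map (fun i => (pvFind readyLCDict i).getD [])
  let lengths := chunks.map (fun c => (c.length : Int))
  let LCBound := (PySem.List.pyRange 0 3 1).map
    (fun i => (PySem.List.slice lengths none (some (i + 1))).sum)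
  (LCBound, chunks.flatMap id)

-- ===== PRECONDITION & SPEC =====
def Spec_lineBound (readyLCDict : List (Int × List Int)) (out : List Int × List Int) : Prop := out = lineBound_alt readyLCDict
instance (readyLCDict : List (Int × List Int)) (out : List Int × List Int) : Decidable (Spec_lineBound readyLCDict out) := by unfold Spec_lineBound; infer_instance

-- ===== CLAIM (what is proved, stated in full; the proofs are below) =====
def Claim_equal_lineBound : Prop := ∀ (readyLCDict : List (Int × List Int)), Dom_lineBound readyLCDict → Spec_lineBound readyLCDict (lineBound readyLCDict)

-- ===== LEMMAS AND PROOFS =====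
theorem pvRange3 : PySem.List.pyRange 0 3 1 = [0, 1, 2] := by decide

-- ===== VERDICT (by name: the statement is the Claim_ definition above) =====
theorem lineBound_spec : Claim_equal_lineBound := by
  intro d _
  unfold Spec_lineBound lineBound lineBound_alt
  rw [pvRange3]
  cases h0 : pvFind d 0 <;> cases h1 : pvFind d 1 <;> cases h2 : pvFind d 2 <;>
    simp [h0, h1, h2, PySem.List.slice, PySem.List.pyGet?, PySem.List.pyIdx?,
      List.flatMap] <;> omega
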